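-- pv_equiv track=rewrite | github.com/ivre/ivre | ivre/utils.py | ports2nmapspec
-- ===== SOURCE A (Python) =====
-- from typing import (
--     Any,
--     AnyStr,
--     BinaryIO,
--     Callable,
--     Dict,
--     Generator,
--     Iterable,
--     List,
--     Match,
--     Optional,
--     Pattern,
--     Set,
--     Tuple,
--     Type,
--     Union,
--     cast,
-- )
--
-- def ports2nmapspec(portlist: Iterable[int]) -> str:
--     """This function takes an iterable and returns a string
--     suitable for use as argument for Nmap's -p option.
--
--     """
--     # unique and sorted (http://stackoverflow.com/a/13605607/3223422)
--     portlist = sorted(set(portlist))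
--     result: List[str] = []
--     current: Tuple[Optional[int], Optional[int]] = (None, None)
--     for port in portlist:
--         if port - 1 == current[1]:
--             current = (current[0], port)
--         else:
--             if current[0] is not None:
--                 result.append(
--                     str(current[0]) if current[0] == current[1] else "%d-%d" % current  # type: ignore
--                 )
--             current = (port, port)
--     if current[0] is not None:
--         result.append(
--             str(current[0]) if current[0] == current[1] else "%d-%d" % current  # type: ignore
--         )
--     return ",".join(result)
-- ===== SOURCE B (Python) =====
-- def ports2nmapspec(portlist):
--     """This function takes an iterable and returns a string
--     suitable for use as argument for Nmap's -p option.
--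
--     """
--     ports = sorted(set(portlist))
--     if not ports:
--         return ""
--     # a run boundary sits between adjacent elements p, q with q != p + 1
--     breaks = [pq for pq in zip(ports, ports[1:]) if pq[1] != pq[0] + 1]
--     starts = [ports[0]] + [q for _, q in breaks]
--     ends = [p for p, _ in breaks] + [ports[-1]]
--     return ",".join(
--         str(a) if a == b else "%d-%d" % (a, b) for a, b in zip(starts, ends)
--     )
-- ===== Notes on version B (the rewrite author's own statement) =====
-- stated objective: alternative
-- what changed: Replaces A's incremental Optional-tuple state machine (carrying and flushing a 'current' range) with a stateless break-point formulation: pair adjacent elements of the sorted deduped list, keep the non-consecutive pairs as run boundaries, and zip the resulting run starts with run ends.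
import Mathlib
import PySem

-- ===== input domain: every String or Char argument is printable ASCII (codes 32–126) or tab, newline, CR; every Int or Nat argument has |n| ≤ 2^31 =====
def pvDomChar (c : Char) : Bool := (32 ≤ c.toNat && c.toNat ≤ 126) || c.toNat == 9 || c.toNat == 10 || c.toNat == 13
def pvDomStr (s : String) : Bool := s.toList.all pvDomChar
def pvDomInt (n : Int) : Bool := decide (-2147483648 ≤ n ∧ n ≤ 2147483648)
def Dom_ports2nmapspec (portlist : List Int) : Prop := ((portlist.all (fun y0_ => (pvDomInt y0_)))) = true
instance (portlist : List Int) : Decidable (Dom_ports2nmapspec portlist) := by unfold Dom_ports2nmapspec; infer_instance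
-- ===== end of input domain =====

-- B replaces A's incremental Optional-tuple state machine with a stateless break-point
-- formulation (filter non-consecutive adjacent pairs, zip run starts with run ends);
-- objective: alternative decomposition, same cost.

-- ===== PORT A =====
-- str(current[0]) if current[0] == current[1] else "%d-%d" % current
-- (the (some, none) / (none, _) cases are unreachable: A only formats after setting both)
def pvFmtCurA : Option Int × Option Int → String
  | (some a, some b) =>
      if a = b then PySem.Int.toStr a
      else PySem.Int.toStr a ++ "-" ++ PySem.Int.toStr b
  | _ => ""

-- 'if current[0] is not None: result.append(…)' — the flush A performs in the else branch and after the loop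
def pvFlushA (st : List String × (Option Int × Option Int)) : List String :=
  match st.2.1 with
  | some _ => st.1 ++ [pvFmtCurA st.2]
  | none => st.1

-- one iteration of A's for loop over (result, current)
def pvStepA (st : List String × (Option Int × Option Int)) (port : Int) :
    List String × (Option Int × Option Int) :=
  if some (port - 1) = st.2.2 then (st.1, (st.2.1, some port))
  else (pvFlushA st, (some port, some port))

def ports2nmapspec (portlist : List Int) : String :=
  let pl := PySem.List.sorted (PySem.Set.ofList portlist) (fun x => x) false
  let st := pl.foldl pvStepA ([], (none, none))
  PySem.Str.join "," (pvFlushA st)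

-- ===== PORT B =====
-- str(a) if a == b else "%d-%d" % (a, b)
def pvFmtB (a b : Int) : String :=
  if a = b then PySem.Int.toStr a
  else PySem.Int.toStr a ++ "-" ++ PySem.Int.toStr b

def ports2nmapspec_alt (portlist : List Int) : String :=
  match PySem.List.sorted (PySem.Set.ofList portlist) (fun x => x) false with
  | [] => ""
  | x :: xs =>
    -- breaks = [pq for pq in zip(ports, ports[1:]) if pq[1] != pq[0] + 1]
    let breaks := (List.zip (x :: xs) xs).filter (fun pq => pq.2 != pq.1 + 1)
    let starts := x :: breaks.map Prod.snd
    let ends := breaks.map Prod.fst ++ [(x :: xs).getLast (List.cons_ne_nil x xs)]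
    PySem.Str.join "," ((starts.zip ends).map (fun ab => pvFmtB ab.1 ab.2))

-- ===== PRECONDITION & SPEC =====
def Spec_ports2nmapspec (portlist : List Int) (out : String) : Prop := out = ports2nmapspec_alt portlist
instance (portlist : List Int) (out : String) : Decidable (Spec_ports2nmapspec portlist out) := by unfold Spec_ports2nmapspec; infer_instance

-- ===== CLAIM (what is proved, stated in full; the proofs are below) =====
def Claim_equal_ports2nmapspec : Prop := ∀ (portlist : List Int), Dom_ports2nmapspec portlist → Spec_ports2nmapspec portlist (ports2nmapspec portlist)

-- ===== LEMMAS AND PROOFS =====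

-- reference run decomposition: pvGo f l ys = pieces of the runs of f-started range with last element l followed by ys
def pvGo (f l : Int) : List Int → List String
  | [] => [pvFmtB f l]
  | y :: ys => if y = l + 1 then pvGo f y ys else pvFmtB f l :: pvGo y y ys

lemma flushA_some (res : List String) (f l : Int) :
    pvFlushA (res, (some f, some l)) = res ++ [pvFmtB f l] := rfl

-- A's loop, started after the first element has been absorbed, produces pvGo
lemma sideA (ys : List Int) : ∀ (res : List String) (f l : Int),
    pvFlushA (ys.foldl pvStepA (res, (some f, some l))) = res ++ pvGo f l ys := by
  induction ys with
  | nil => intro res f l; simp [pvGo, flushA_some]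
  | cons y ys ih =>
    intro res f l
    rw [List.foldl_cons]
    by_cases h : y = l + 1
    · rw [show pvStepA (res, (some f, some l)) y = (res, (some f, some y)) from by
        simp [pvStepA]; omega, ih]
      simp [pvGo, h]
    · rw [show pvStepA (res, (some f, some l)) y
          = (res ++ [pvFmtB f l], (some y, some y)) from by
        have hc : ¬ (some (y - 1) = (some l : Option Int)) := by simp; omega
        simp [pvStepA, hc, flushA_some], ih]
      simp [pvGo, h]

-- B's break-point construction produces the same pvGo
lemma sideB (ys : List Int) : ∀ (f l : Int),
    (((f :: (((l :: ys).zip ys).filter (fun pq => pq.2 != pq.1 + 1)).map Prod.snd).zip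
      ((((l :: ys).zip ys).filter (fun pq => pq.2 != pq.1 + 1)).map Prod.fst ++
        [(l :: ys).getLast (List.cons_ne_nil l ys)])).map (fun ab => pvFmtB ab.1 ab.2))
      = pvGo f l ys := by
  induction ys with
  | nil => intro f l; simp [pvGo]
  | cons y ys ih =>
    intro f l
    have hlast : (l :: y :: ys).getLast (List.cons_ne_nil l (y :: ys))
        = (y :: ys).getLast (List.cons_ne_nil y ys) := by
      simp [List.getLast_cons]
    by_cases h : y = l + 1
    · have hb : ((l, y).2 != (l, y).1 + 1) = false := by simp [h]
      rw [List.zip_cons_cons, List.filter_cons, hb, hlast]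
      simp only [Bool.false_eq_true, if_false]
      exact (ih f y).trans (by simp [pvGo, h])
    · have hb : ((l, y).2 != (l, y).1 + 1) = true := by simp [h]
      rw [List.zip_cons_cons, List.filter_cons, hb, hlast]
      simp only [if_true, List.map_cons, List.cons_append, List.zip_cons_cons,
        List.map_cons]
      rw [ih y y]
      simp [pvGo, h]

-- ===== VERDICT (by name: the statement is the Claim_ definition above) =====
theorem ports2nmapspec_spec : Claim_equal_ports2nmapspec := by
  intro portlist _
  unfold Spec_ports2nmapspec ports2nmapspec ports2nmapspec_alt
  cases hs : PySem.List.sorted (PySem.Set.ofList portlist) (fun x => x) false with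
  | nil => rfl
  | cons x xs =>
    simp only [List.foldl_cons]
    have hfirst : pvStepA ([], (none, none)) x = ([], (some x, some x)) := by
      simp [pvStepA, pvFlushA]
    rw [hfirst, sideA xs [] x x, List.nil_append, sideB xs x x]
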